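-- pv_equiv track=rewrite | github.com/ojashyadav101/lucy | src/lucy/pipeline/fact_verifier.py | _should_validate_url
-- ===== SOURCE A (Python) =====
-- _SKIP_URL_DOMAINS = frozenset({
--     "github.com", "gitlab.com", "stackoverflow.com",
--     "google.com", "youtube.com", "twitter.com", "x.com",
--     "slack.com", "notion.so", "figma.com",
--     "npmjs.com", "pypi.org", "crates.io",
--     "wikipedia.org", "developer.mozilla.org",
--     "docs.google.com", "drive.google.com",
-- })
--
-- def _should_validate_url(url: str) -> bool:
--     """Check if a URL should be validated (skip known-good domains)."""
--     try:
--         # Extract domain from URL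
--         domain = url.split("//", 1)[1].split("/", 1)[0].split(":", 1)[0]
--         # Check against skip list (including subdomains)
--         for skip_domain in _SKIP_URL_DOMAINS:
--             if domain == skip_domain or domain.endswith("." + skip_domain):
--                 return False
--         return True
--     except (IndexError, ValueError):
--         return False
-- ===== SOURCE B (Python) =====
-- _SKIP_URL_DOMAINS = frozenset({
--     "github.com", "gitlab.com", "stackoverflow.com",
--     "google.com", "youtube.com", "twitter.com", "x.com",
--     "slack.com", "notion.so", "figma.com",
--     "npmjs.com", "pypi.org", "crates.io",
--     "wikipedia.org", "developer.mozilla.org",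
--     "docs.google.com", "drive.google.com",
-- })
--
--
-- def _should_validate_url(url: str) -> bool:
--     """Check if a URL should be validated (skip known-good domains)."""
--     try:
--         domain = url.split("//", 1)[1].split("/", 1)[0].split(":", 1)[0]
--     except (IndexError, ValueError):
--         return False
--     # Instead of scanning the skip set with endswith, walk the domain itself:
--     # the domain matches iff the whole domain, or the suffix after some dot,
--     # is exactly a skip-list entry (O(1) set lookups).
--     if domain in _SKIP_URL_DOMAINS:
--         return False
--     for i, ch in enumerate(domain):
--         if ch == "." and domain[i + 1:] in _SKIP_URL_DOMAINS:
--             return False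
--     return True
-- ===== Notes on version B (the rewrite author's own statement) =====
-- stated objective: alternative
-- what changed: B inverts the search: instead of scanning the 17-element skip set and testing each entry with == / endswith, it walks the extracted domain once and does an O(1) set-membership lookup for the whole domain and for the suffix after each dot.
import Mathlib
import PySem

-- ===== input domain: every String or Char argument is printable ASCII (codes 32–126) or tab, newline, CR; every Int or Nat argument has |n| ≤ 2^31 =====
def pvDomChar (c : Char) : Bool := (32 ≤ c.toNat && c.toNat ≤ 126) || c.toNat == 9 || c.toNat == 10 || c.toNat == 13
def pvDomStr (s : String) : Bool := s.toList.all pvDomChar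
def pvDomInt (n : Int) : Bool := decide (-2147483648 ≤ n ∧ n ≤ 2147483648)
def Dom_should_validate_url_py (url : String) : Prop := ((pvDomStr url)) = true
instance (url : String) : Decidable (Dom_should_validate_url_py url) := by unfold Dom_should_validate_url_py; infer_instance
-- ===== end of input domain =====

-- B walks the domain's own dot-suffixes with set lookups instead of scanning the skip set with endswith; same return value everywhere.

-- the module constant _SKIP_URL_DOMAINS (its iteration order does not affect either boolean result)
def pySkipDomains : List String :=
  ["github.com", "gitlab.com", "stackoverflow.com",
   "google.com", "youtube.com", "twitter.com", "x.com",
   "slack.com", "notion.so", "figma.com",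
   "npmjs.com", "pypi.org", "crates.io",
   "wikipedia.org", "developer.mozilla.org",
   "docs.google.com", "drive.google.com"]

-- domain = url.split("//", 1)[1].split("/", 1)[0].split(":", 1)[0]   (none = IndexError, caught by both)
def extractDomain? (url : String) : Option String :=
  (PySem.Str.splitMax? url "//" 1).bind fun p1 =>
  (PySem.List.pyGet? p1 1).bind fun r1 =>
  (PySem.Str.splitMax? r1 "/" 1).bind fun p2 =>
  (PySem.List.pyGet? p2 0).bind fun r2 =>
  (PySem.Str.splitMax? r2 ":" 1).bind fun p3 =>
  PySem.List.pyGet? p3 0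

-- ===== PORT A =====
-- the for-loop over the skip set: first match returns False, exhausted loop returns True
def aLoop (domain : String) : List String → Bool
  | [] => true
  | s :: rest =>
      if domain == s || PySem.Str.endswith domain ("." ++ s) then false
      else aLoop domain rest

def should_validate_url_py (url : String) : Bool :=
  match extractDomain? url with
  | none => false
  | some domain => aLoop domain pySkipDomains

-- ===== PORT B =====
def skipSetChars : PySem.Set (List Char) := PySem.Set.ofList (pySkipDomains.map String.toList)

-- the for-loop over enumerate(domain): at index i, domain[i+1:] is the tail of the current suffix
def bDotScan : List Char → Bool
  | [] => false
  | c :: rest => ((c == '.') && PySem.Set.contains skipSetChars rest) || bDotScan rest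

def should_validate_url_py_alt (url : String) : Bool :=
  match extractDomain? url with
  | none => false
  | some domain =>
      if PySem.Set.contains skipSetChars domain.toList then false
      else if bDotScan domain.toList then false
      else true

-- ===== PRECONDITION & SPEC =====
def Spec_should_validate_url_py (url : String) (out : Bool) : Prop := out = should_validate_url_py_alt url
instance (url : String) (out : Bool) : Decidable (Spec_should_validate_url_py url out) := by unfold Spec_should_validate_url_py; infer_instance

-- ===== CLAIM (what is proved, stated in full; the proofs are below) =====
def Claim_equal_should_validate_url_py : Prop := ∀ (url : String), Dom_should_validate_url_py url → Spec_should_validate_url_py url (should_validate_url_py url)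

-- ===== LEMMAS AND PROOFS =====

theorem contains_skipSetChars (cs : List Char) :
    PySem.Set.contains skipSetChars cs = true ↔ ∃ s ∈ pySkipDomains, s.toList = cs := by
  rw [PySem.Set.contains_iff, skipSetChars, PySem.Set.mem_ofList, List.mem_map]

theorem bDotScan_iff (cs : List Char) :
    bDotScan cs = true ↔ ∃ s ∈ pySkipDomains, ('.' :: s.toList) <:+ cs := by
  induction cs with
  | nil =>
      constructor
      · intro h; simp [bDotScan] at h
      · rintro ⟨s, _, h⟩; simp at h
  | cons c rest ih =>
      simp only [bDotScan, Bool.or_eq_true, Bool.and_eq_true, beq_iff_eq, ih,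
        contains_skipSetChars]
      constructor
      · rintro (⟨hc, s, hs, hcs⟩ | ⟨s, hs, h⟩)
        · exact ⟨s, hs, by rw [hc, hcs]⟩
        · exact ⟨s, hs, h.trans (List.suffix_cons c rest)⟩
      · rintro ⟨s, hs, h⟩
        rcases List.suffix_cons_iff.mp h with heq | h'
        · cases heq; exact Or.inl ⟨rfl, s, hs, rfl⟩
        · exact Or.inr ⟨s, hs, h'⟩

theorem hit_iff (d s : String) :
    (d == s || PySem.Str.endswith d ("." ++ s)) = true ↔
      (d = s ∨ ('.' :: s.toList) <:+ d.toList) := by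
  have htl : ("." ++ s).toList = '.' :: s.toList := by simp
  simp only [Bool.or_eq_true, beq_iff_eq, PySem.Str.endswith_eq, htl,
    PySem.Chars.endswith_iff]

theorem aLoop_eq (d : String) (L : List String) :
    aLoop d L = !(L.any fun s => d == s || PySem.Str.endswith d ("." ++ s)) := by
  induction L with
  | nil => rfl
  | cons s rest ih =>
      simp only [aLoop, List.any_cons]
      split_ifs with h
      · simp only [h, Bool.true_or, Bool.not_true]
      · simp only [Bool.eq_false_iff.mpr h, Bool.false_or, ih]

theorem toList_inj {d s : String} (h : s.toList = d.toList) : d = s :=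
  String.toList_inj.mp h.symm

theorem core_eq (d : String) :
    aLoop d pySkipDomains =
      (if PySem.Set.contains skipSetChars d.toList then false
       else if bDotScan d.toList then false else true) := by
  rw [aLoop_eq]
  by_cases hc : PySem.Set.contains skipSetChars d.toList = true
  · rcases (contains_skipSetChars _).mp hc with ⟨s, hs, hcs⟩
    simp only [hc, if_true, Bool.not_eq_false', List.any_eq_true]
    exact ⟨s, hs, (hit_iff d s).mpr (Or.inl (toList_inj hcs))⟩
  · simp only [hc, if_false, Bool.false_eq_true]
    by_cases hb : bDotScan d.toList = true
    · rcases (bDotScan_iff _).mp hb with ⟨s, hs, hsuf⟩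
      simp only [hb, if_true, Bool.not_eq_false', List.any_eq_true]
      exact ⟨s, hs, (hit_iff d s).mpr (Or.inr hsuf)⟩
    · simp only [hb, if_false, Bool.not_eq_true', Bool.false_eq_true]
      rw [List.any_eq_false]
      intro s hs hhit
      rcases (hit_iff d s).mp hhit with heq | hsuf
      · subst heq; exact hc ((contains_skipSetChars _).mpr ⟨d, hs, rfl⟩)
      · exact hb ((bDotScan_iff _).mpr ⟨s, hs, hsuf⟩)

-- ===== VERDICT (by name: the statement is the Claim_ definition above) =====
theorem should_validate_url_py_spec : Claim_equal_should_validate_url_py := by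
  intro url _
  unfold Spec_should_validate_url_py should_validate_url_py should_validate_url_py_alt
  cases extractDomain? url with
  | none => rfl
  | some d => exact core_eq d
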